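-- pv_equiv track=rewrite | github.com/guyberger20/datadog-query-formatter | alfred/formatter-alfred.py | formatMsg
-- ===== SOURCE A (Python) =====
-- def formatMsg(msg):
--     msg_arr = msg.split(' ')
--     out = ''
--     for w in msg_arr:
--         escaped = w.translate(str.maketrans({"-":  r"\-",
--                                              "]":  r"\]",
--                                              "[":  r"\[",
--                                              "\\": r"\\",
--                                              "/": r"\/",
--                                              "^":  r"\^",
--                                              "$":  r"\$",
--                                              "*":  r"\*",
--                                              "(":  r"\(",
--                                              ")":  r"\)",
--                                              ".":  r"\."}))
--         out += escaped + '?'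
--     return out[:len(out) - 1]
-- ===== SOURCE B (Python) =====
-- _TABLE = str.maketrans({"-":  r"\-",
--                         "]":  r"\]",
--                         "[":  r"\[",
--                         "\\": r"\\",
--                         "/":  r"\/",
--                         "^":  r"\^",
--                         "$":  r"\$",
--                         "*":  r"\*",
--                         "(":  r"\(",
--                         ")":  r"\)",
--                         ".":  r"\.",
--                         " ":  "?"})
--
--
-- def formatMsg(msg):
--     # one character-level pass: spaces become '?', regex specials get escaped
--     return msg.translate(_TABLE)
-- ===== Notes on version B (the rewrite author's own statement) =====
-- stated objective: simpler
-- what changed: Replaces the split-on-space / per-word translate / concatenate-with-'?' / trim-last-char loop by a single translate over the whole string whose table adds the entry ' ' -> '?'.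
import Mathlib
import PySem

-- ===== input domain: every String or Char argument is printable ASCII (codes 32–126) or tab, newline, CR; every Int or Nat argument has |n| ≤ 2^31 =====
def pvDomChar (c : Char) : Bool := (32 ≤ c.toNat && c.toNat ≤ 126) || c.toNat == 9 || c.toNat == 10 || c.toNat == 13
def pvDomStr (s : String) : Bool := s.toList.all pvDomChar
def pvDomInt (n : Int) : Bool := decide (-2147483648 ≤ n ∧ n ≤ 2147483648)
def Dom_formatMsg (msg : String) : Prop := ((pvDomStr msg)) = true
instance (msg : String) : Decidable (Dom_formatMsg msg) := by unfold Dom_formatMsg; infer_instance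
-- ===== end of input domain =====

-- B replaces A's split / per-word escape / join-with-'?' / trim loop by one
-- character-level translate whose table also maps ' ' to '?' (objective: simpler).

-- ===== PORT A =====
-- A's translate table: each listed regex character c maps to "\" ++ c
def pvSpecialsA : List Char := ['-', ']', '[', '\\', '/', '^', '$', '*', '(', ')', '.']

def pvEscA (c : Char) : List Char := if c ∈ pvSpecialsA then ['\\', c] else [c]

def formatMsg (msg : String) : String :=
  let msgArr := PySem.Chars.splitOn msg.toList [' ']          -- msg.split(' ')
  let out := msgArr.foldl (fun out w => out ++ (w.flatMap pvEscA ++ ['?'])) ([] : List Char)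
  String.mk (PySem.Chars.slice out none (some ((out.length : Int) - 1)))  -- out[:len(out)-1]

-- ===== PORT B =====
-- B's single translate table: the same escapes plus ' ' -> '?'
def pvTableB (c : Char) : List Char :=
  if c = ' ' then ['?']
  else if c ∈ (['-', ']', '[', '\\', '/', '^', '$', '*', '(', ')', '.'] : List Char) then ['\\', c]
  else [c]

def formatMsg_alt (msg : String) : String :=
  String.mk (msg.toList.flatMap pvTableB)                     -- msg.translate(_TABLE)

-- ===== PRECONDITION & SPEC =====
def Spec_formatMsg (msg : String) (out : String) : Prop := out = formatMsg_alt msg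
instance (msg : String) (out : String) : Decidable (Spec_formatMsg msg out) := by unfold Spec_formatMsg; infer_instance

-- ===== CLAIM (what is proved, stated in full; the proofs are below) =====
def Claim_equal_formatMsg : Prop := ∀ (msg : String), Dom_formatMsg msg → Spec_formatMsg msg (formatMsg msg)

-- ===== LEMMAS AND PROOFS =====

-- reference split-on-single-space, structural on the char list
def pvSplitSp : List Char → List (List Char)
  | [] => [[]]
  | c :: r => if c = ' ' then [] :: pvSplitSp r
              else match pvSplitSp r with
                   | w :: ws => (c :: w) :: ws
                   | [] => [[c]]

def pvMapHead (f : List Char → List Char) : List (List Char) → List (List Char)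
  | [] => []
  | w :: ws => f w :: ws

lemma pvSplitSp_ne_nil (cs : List Char) : pvSplitSp cs ≠ [] := by
  cases cs with
  | nil => simp [pvSplitSp]
  | cons c r =>
    simp only [pvSplitSp]
    split_ifs
    · simp
    · cases pvSplitSp r <;> simp

lemma pv_go_eq (fuel : Nat) (l cur : List Char) (acc : List (List Char))
    (h : l.length < fuel) :
    PySem.Chars.splitOn.go [' '] fuel l cur acc
      = acc.reverse ++ pvMapHead (cur.reverse ++ ·) (pvSplitSp l) := by
  induction fuel generalizing l cur acc with
  | zero => omega
  | succ fuel ih =>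
    cases l with
    | nil => simp [PySem.Chars.splitOn.go, pvSplitSp, pvMapHead]
    | cons c rest =>
      by_cases hc : c = ' '
      · subst hc
        have hpre : ([' '] : List Char).isPrefixOf (' ' :: rest) = true := by simp
        simp only [PySem.Chars.splitOn.go, hpre, if_true]
        have hd : List.drop ([' '] : List Char).length (' ' :: rest) = rest := rfl
        rw [hd, ih rest [] ((cur.reverse) :: acc) (by simp only [List.length_cons] at h; omega)]
        cases hsp : pvSplitSp rest with
        | nil => exact absurd hsp (pvSplitSp_ne_nil rest)
        | cons w ws => simp [pvSplitSp, hsp, pvMapHead]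
      · have hpre : ([' '] : List Char).isPrefixOf (c :: rest) = false := by
          simp [List.isPrefixOf]; exact fun h => absurd h.symm hc
        simp only [PySem.Chars.splitOn.go, hpre, Bool.false_eq_true, if_false]
        rw [ih rest (c :: cur) acc (by simp only [List.length_cons] at h; omega)]
        simp only [pvSplitSp, hc, if_false]
        rcases hsp : pvSplitSp rest with _ | ⟨w, ws⟩
        · exact absurd hsp (pvSplitSp_ne_nil rest)
        · simp [pvMapHead]

lemma pv_splitOn_eq (cs : List Char) :
    PySem.Chars.splitOn cs [' '] = pvSplitSp cs := by
  unfold PySem.Chars.splitOn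
  rw [pv_go_eq cs.length.succ cs [] [] (Nat.lt_succ_self _)]
  rcases hsp : pvSplitSp cs with _ | ⟨w, ws⟩
  · exact absurd hsp (pvSplitSp_ne_nil cs)
  · simp [pvMapHead]

lemma pvTableB_eq (c : Char) :
    pvTableB c = if c = ' ' then ['?'] else pvEscA c := by
  by_cases h : c = ' ' <;> simp [pvTableB, pvEscA, pvSpecialsA, h]

lemma pv_main (cs : List Char) :
    (pvSplitSp cs).flatMap (fun w => w.flatMap pvEscA ++ ['?'])
      = cs.flatMap pvTableB ++ ['?'] := by
  induction cs with
  | nil => simp [pvSplitSp]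
  | cons c r ih =>
    by_cases hc : c = ' '
    · subst hc
      simp only [pvSplitSp, if_true, List.flatMap_cons, List.flatMap_nil, List.nil_append]
      rw [ih]
      simp [pvTableB_eq]
    · simp only [pvSplitSp, hc, if_false]
      rcases hsp : pvSplitSp r with _ | ⟨w, ws⟩
      · exact absurd hsp (pvSplitSp_ne_nil r)
      · have hr := ih
        rw [hsp] at hr
        simp only [List.flatMap_cons, List.append_assoc] at hr ⊢
        rw [hr, pvTableB_eq]
        simp [hc]

-- ===== VERDICT (by name: the statement is the Claim_ definition above) =====
theorem formatMsg_spec : Claim_equal_formatMsg := by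
  intro msg _
  unfold Spec_formatMsg formatMsg formatMsg_alt
  simp only [pv_splitOn_eq, PySem.List.foldl_append_eq_flatMap, List.nil_append]
  rw [pv_main]
  set B := msg.toList.flatMap pvTableB with hB
  have hlen : ((B ++ ['?']).length : Int) - 1 = (B.length : Nat) := by
    simp
  rw [PySem.Chars.slice_eq_listSlice, hlen, PySem.List.slice_to_natCast, List.take_left]
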